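-- pv_equiv track=rewrite | github.com/eggylan/Optimization-Based-on-3D | old/基于三维点阵模型的邻块数据优化.py | split_fill_command
-- ===== SOURCE A (Python) =====
-- def split_fill_command(start, end, block_name, state_string):
--
--     x1, y1, z1 = start
--     x2, y2, z2 = end
--     block_count = (x2 - x1 + 1) * (y2 - y1 + 1) * (z2 - z1 + 1)
-- #最大限制
--     if block_count <= 32367:
--         command = f"fill ~{x1} ~{y1} ~{z1} ~{x2} ~{y2} ~{z2} {block_name}"
--         if state_string:
--             command += f" {state_string}"
--         return [command]
--
--     commands = []
--     step = max(1, int(block_count ** (1 / 3)))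
--     for i in range(x1, x2 + 1, step):
--         for j in range(y1, y2 + 1, step):
--             for k in range(z1, z2 + 1, step):
--                 sub_x2 = min(i + step - 1, x2)
--                 sub_y2 = min(j + step - 1, y2)
--                 sub_z2 = min(k + step - 1, z2)
--                 commands.extend(split_fill_command((i, j, k), (sub_x2, sub_y2, sub_z2), block_name, state_string))
--     return commands
-- ===== SOURCE B (Python) =====
-- def split_fill_command(start, end, block_name, state_string):
--     out = []
--     stack = [(start, end)]
--     while stack:
--         (x1, y1, z1), (x2, y2, z2) = stack.pop()
--         block_count = (x2 - x1 + 1) * (y2 - y1 + 1) * (z2 - z1 + 1)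
--         if block_count <= 32367:
--             parts = ["fill", f"~{x1}", f"~{y1}", f"~{z1}",
--                      f"~{x2}", f"~{y2}", f"~{z2}", block_name]
--             if state_string:
--                 parts.append(state_string)
--             out.append(" ".join(parts))
--         else:
--             step = max(1, int(block_count ** (1 / 3)))
--             subs = [((i, j, k),
--                      (min(i + step - 1, x2), min(j + step - 1, y2), min(k + step - 1, z2)))
--                     for i in range(x1, x2 + 1, step)
--                     for j in range(y1, y2 + 1, step)
--                     for k in range(z1, z2 + 1, step)]
--             stack.extend(reversed(subs))
--     return out
-- ===== Notes on version B (the rewrite author's own statement) =====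
-- stated objective: alternative
-- what changed: Replaces A's recursive DFS with an iterative worklist: an explicit LIFO stack of boxes (sub-boxes pushed in reverse so popping reproduces A's preorder) and commands assembled by ' '.join over a parts list instead of f-string concatenation; threshold and step formula are kept.
import Mathlib
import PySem

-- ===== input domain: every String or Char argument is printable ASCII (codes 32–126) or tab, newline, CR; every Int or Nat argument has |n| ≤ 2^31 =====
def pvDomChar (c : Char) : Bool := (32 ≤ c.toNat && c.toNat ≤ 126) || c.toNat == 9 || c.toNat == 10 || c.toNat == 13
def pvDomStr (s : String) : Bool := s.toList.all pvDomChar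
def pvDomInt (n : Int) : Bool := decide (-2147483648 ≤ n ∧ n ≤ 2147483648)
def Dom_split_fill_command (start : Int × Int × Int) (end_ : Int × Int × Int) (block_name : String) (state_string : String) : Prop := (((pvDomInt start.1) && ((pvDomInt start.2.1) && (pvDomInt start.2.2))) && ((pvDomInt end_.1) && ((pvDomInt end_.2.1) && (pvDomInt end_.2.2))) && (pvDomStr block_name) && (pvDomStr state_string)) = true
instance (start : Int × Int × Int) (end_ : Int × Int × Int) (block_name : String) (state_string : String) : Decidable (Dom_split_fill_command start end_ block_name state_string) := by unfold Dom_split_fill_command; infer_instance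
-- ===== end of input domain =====

-- B replaces A's recursive DFS by an iterative LIFO-worklist loop (same tiling rule and
-- output, different decomposition); equality of the return values is claimed on Pre_ below.

-- ---------------------------------------------------------------------------
-- Helper shared by BOTH ports: exact hand port of Python's `int(block_count ** (1 / 3))`.
-- CPython converts the int to the nearest IEEE-754 double (round half to even), applies
-- pow with the exponent double(1/3) = 6004799503160661 / 2^54 (glibc's pow, correctly
-- rounded), and int() truncates.  This is reproduced exactly with 192-bit fixed-point
-- integer arithmetic (96 result bits of log2/exp2, far more than the 53 the double needs);
-- it is exact on every block_count the admitted inputs produce (checked differentially).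
-- Both ports share it because B deliberately keeps A's step formula (same tiling).
-- ---------------------------------------------------------------------------

-- round num / 2^sh to nearest integer, ties to even
def pvRndHE (num sh : Nat) : Nat :=
  if sh = 0 then num else
  let q := num >>> sh
  let r := num - (q <<< sh)
  let half := 1 <<< (sh - 1)
  if half < r ∨ (r = half ∧ q % 2 = 1) then q + 1 else q

def pvBitLen (n : Nat) : Nat := if n = 0 then 0 else Nat.log2 n + 1

-- 96 bits of log2(x) for x in [1,2), x scaled by 2^192, by repeated squaring
def pvLogLoop : Nat → Nat → Nat → Nat
  | 0, _, bits => bits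
  | i + 1, x, bits =>
    let x2 := (x * x) >>> 192
    if x2 < 2 <<< 192 then pvLogLoop i x2 (2 * bits) else pvLogLoop i (x2 >>> 1) (2 * bits + 1)

-- a in [2^52, 2^53): the first 96 fraction bits of log2(a / 2^52)
def pvLog2Frac (a : Nat) : Nat := pvLogLoop 96 (a <<< 140) 0

-- 2^(f / 2^96) scaled by 2^192, via the square-root chain 2^(2^-1), 2^(2^-2), …
def pvExpLoop : Nat → Nat → Nat → Nat → Nat
  | 0, _, _, y => y
  | i + 1, f, s, y =>
    let s' := Nat.sqrt (s <<< 192)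
    pvExpLoop i f s' (if (f >>> i) % 2 = 1 then (y * s') >>> 192 else y)

def pvExp2Frac (f : Nat) : Nat := pvExpLoop 96 f (2 <<< 192) (1 <<< 192)

-- int(float(n) ** (1/3)) for n ≥ 1 (every call site has n > 32367)
def pvStep (n : Int) : Int :=
  let nn := n.toNat
  let L := pvBitLen nn
  -- nearest double to n, as mantissa a ∈ [2^52, 2^53) and value (a / 2^52) · 2^Lint
  let am : Nat × Nat :=
    if L ≤ 53 then (nn <<< (53 - L), L - 1)
    else
      let a0 := pvRndHE nn (L - 53)
      if a0 = 1 <<< 53 then (1 <<< 52, L) else (a0, L - 1)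
  let frac := pvLog2Frac am.1
  -- exponent (1/3 as a double) times log2(t), in 96-bit fixed point
  let e := (6004799503160661 * ((am.2 <<< 96) + frac)) >>> 54
  let j := e >>> 96
  let y := pvExp2Frac (e - (j <<< 96))          -- 2^frac-part, scaled 2^192
  let dm0 := pvRndHE y 140                      -- round to the double's 53-bit mantissa
  let dj : Nat × Int := if dm0 = 1 <<< 53 then (1 <<< 52, (j : Int) - 51) else (dm0, (j : Int) - 52)
  -- the double is dj.1 · 2^dj.2 ; int() truncates toward zero (value is positive)
  if 0 ≤ dj.2 then (dj.1 : Int) * 2 ^ dj.2.toNat else ((dj.1 >>> dj.2.natAbs : Nat) : Int)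

-- ===== PORT A =====

-- A's recursion, transliterated.  Python has no fuel: the two Nat arguments are a pure
-- totality device (d bounds the recursion depth structurally, n is decremented once per
-- call, i.e. per visited box, and is threaded through the nested loops; with the huge
-- fuel below neither is ever exhausted on inputs Python A itself can finish).  Python A
-- instead raises RecursionError past CPython's depth limit — excluded by Pre_ below.
def pvARec : Nat → Nat → (Int × Int × Int) → (Int × Int × Int) → String → String → Nat × List String
  | _, 0, _, _, _, _ => (0, [])
  | 0, _ + 1, _, _, _, _ => (0, [])
  | d + 1, n + 1, s, e, block_name, state_string =>
    let x1 := s.1; let y1 := s.2.1; let z1 := s.2.2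
    let x2 := e.1; let y2 := e.2.1; let z2 := e.2.2
    let block_count := (x2 - x1 + 1) * (y2 - y1 + 1) * (z2 - z1 + 1)
    if block_count ≤ 32367 then
      let command := "fill ~" ++ PySem.Int.toStr x1 ++ " ~" ++ PySem.Int.toStr y1 ++ " ~" ++
        PySem.Int.toStr z1 ++ " ~" ++ PySem.Int.toStr x2 ++ " ~" ++ PySem.Int.toStr y2 ++
        " ~" ++ PySem.Int.toStr z2 ++ " " ++ block_name
      (n, [if state_string ≠ "" then command ++ (" " ++ state_string) else command])
    else
      let step := max 1 (pvStep block_count)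
      (PySem.List.pyRange x1 (x2 + 1) step).foldl (fun st i =>
        (PySem.List.pyRange y1 (y2 + 1) step).foldl (fun st j =>
          (PySem.List.pyRange z1 (z2 + 1) step).foldl (fun st k =>
            let r := pvARec d st.1 (i, j, k)
              (min (i + step - 1) x2, min (j + step - 1) y2, min (k + step - 1) z2)
              block_name state_string
            (r.1, st.2 ++ r.2)) st) st) (n, [])

def split_fill_command (start : Int × Int × Int) (end_ : Int × Int × Int)
    (block_name : String) (state_string : String) : List String :=
  (pvARec 1000000000000000 1000000000000000 start end_ block_name state_string).2

-- ===== PORT B =====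

-- Source B's sub-box comprehension: the grid of sub-boxes in i/j/k iteration order
def pvSubs (step x1 y1 z1 x2 y2 z2 : Int) : List ((Int × Int × Int) × (Int × Int × Int)) :=
  (PySem.List.pyRange x1 (x2 + 1) step).flatMap fun i =>
    (PySem.List.pyRange y1 (y2 + 1) step).flatMap fun j =>
      (PySem.List.pyRange z1 (z2 + 1) step).map fun k =>
        ((i, j, k), (min (i + step - 1) x2, min (j + step - 1) y2, min (k + step - 1) z2))

-- Source B's while loop over the explicit stack, one fuel unit per iteration (pure totality
-- device, cf. pvARec).  The Lean list models Python's stack with its TOP at the HEAD, so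
-- `stack.pop()` is the head and `stack.extend(reversed(subs))` is `subs ++ rest`.
def pvBLoop : Nat → List ((Int × Int × Int) × (Int × Int × Int)) → List String → String → String → List String
  | 0, _, out, _, _ => out
  | _ + 1, [], out, _, _ => out
  | n + 1, b :: rest, out, block_name, state_string =>
    let x1 := b.1.1; let y1 := b.1.2.1; let z1 := b.1.2.2
    let x2 := b.2.1; let y2 := b.2.2.1; let z2 := b.2.2.2
    let block_count := (x2 - x1 + 1) * (y2 - y1 + 1) * (z2 - z1 + 1)
    if block_count ≤ 32367 then
      let parts := ["fill", "~" ++ PySem.Int.toStr x1, "~" ++ PySem.Int.toStr y1,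
        "~" ++ PySem.Int.toStr z1, "~" ++ PySem.Int.toStr x2, "~" ++ PySem.Int.toStr y2,
        "~" ++ PySem.Int.toStr z2, block_name]
      let parts := if state_string ≠ "" then parts ++ [state_string] else parts
      pvBLoop n rest (out ++ [PySem.Str.join " " parts]) block_name state_string
    else
      let step := max 1 (pvStep block_count)
      pvBLoop n (pvSubs step x1 y1 z1 x2 y2 z2 ++ rest) out block_name state_string

def split_fill_command_alt (start : Int × Int × Int) (end_ : Int × Int × Int)
    (block_name : String) (state_string : String) : List String :=
  pvBLoop 1000000000000000 [(start, end_)] [] block_name state_string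

-- ===== PRECONDITION & SPEC =====
-- Pre_ excludes only oversized boxes ALL of whose sides exceed 600: on those A's split
-- recursion can run past CPython's recursion limit and raise RecursionError (B, being
-- iterative, still returns).  The exact failure boundary is environment-dependent, so the
-- cut is conservative; everything else — including every multi-level split — is admitted.
def Pre_split_fill_command (start : Int × Int × Int) (end_ : Int × Int × Int)
    (block_name : String) (state_string : String) : Prop :=
  (end_.1 - start.1 + 1) * (end_.2.1 - start.2.1 + 1) * (end_.2.2 - start.2.2 + 1) ≤ 32367 ∨
  end_.1 - start.1 + 1 ≤ 600 ∨ end_.2.1 - start.2.1 + 1 ≤ 600 ∨ end_.2.2 - start.2.2 + 1 ≤ 600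
instance (start : Int × Int × Int) (end_ : Int × Int × Int) (block_name : String) (state_string : String) : Decidable (Pre_split_fill_command start end_ block_name state_string) := by unfold Pre_split_fill_command; infer_instance

def pvWitness_split_fill_command : (Int × Int × Int) × (Int × Int × Int) × String × String :=
  ((0, 0, 0), (1, 2, 3), "stone", "lit=true")

def Spec_split_fill_command (start : Int × Int × Int) (end_ : Int × Int × Int) (block_name : String) (state_string : String) (out : List String) : Prop := out = split_fill_command_alt start end_ block_name state_string
instance (start : Int × Int × Int) (end_ : Int × Int × Int) (block_name : String) (state_string : String) (out : List String) : Decidable (Spec_split_fill_command start end_ block_name state_string out) := by unfold Spec_split_fill_command; infer_instance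

-- ===== CLAIM =====
def Claim_equal_split_fill_command : Prop := ∀ (start : Int × Int × Int) (end_ : Int × Int × Int) (block_name : String) (state_string : String), Dom_split_fill_command start end_ block_name state_string → Pre_split_fill_command start end_ block_name state_string → Spec_split_fill_command start end_ block_name state_string (split_fill_command start end_ block_name state_string)

-- ===== LEMMAS AND PROOFS =====
set_option maxRecDepth 4000

-- The equality proof is fuel alignment: A's port spends one unit of its threaded fuel n
-- per visited box, B's loop one unit per popped box, and both visit the boxes in the same
-- (DFS preorder) order; the claim instantiates both fuels with the same constant.

-- the fold step of A's loops, as a named function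
def pvF (d : Nat) (bn ss : String) (st : Nat × List String)
    (b : (Int × Int × Int) × (Int × Int × Int)) : Nat × List String :=
  let r := pvARec d st.1 b.1 b.2 bn ss
  (r.1, st.2 ++ r.2)

theorem pvARec_zero (d : Nat) (s e : Int × Int × Int) (bn ss : String) :
    pvARec d 0 s e bn ss = (0, []) := by
  cases d <;> rfl

theorem pvFoldl_flatMap {α β γ : Type} (l : List β) (g : β → List γ) (f : α → γ → α)
    (init : α) :
    (l.flatMap g).foldl f init = l.foldl (fun st x => (g x).foldl f st) init := by
  induction l generalizing init with
  | nil => rfl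
  | cons x xs ih => simp [List.foldl_append, ih]


theorem pvARec_big (d n : Nat) (s e : Int × Int × Int) (bn ss : String)
    (h : ¬ (e.1 - s.1 + 1) * (e.2.1 - s.2.1 + 1) * (e.2.2 - s.2.2 + 1) ≤ 32367) :
    pvARec (d + 1) (n + 1) s e bn ss =
      (pvSubs (max 1 (pvStep ((e.1 - s.1 + 1) * (e.2.1 - s.2.1 + 1) * (e.2.2 - s.2.2 + 1))))
        s.1 s.2.1 s.2.2 e.1 e.2.1 e.2.2).foldl (pvF d bn ss) (n, []) := by
  simp only [pvARec]
  rw [if_neg h]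
  simp only [pvSubs, pvFoldl_flatMap, List.foldl_map, pvF]


-- fuel only decreases along A's fold
theorem pvARec_fst_le (bn ss : String) :
    ∀ n d (s e : Int × Int × Int), (pvARec d n s e bn ss).1 ≤ n := by
  intro n
  induction n using Nat.strong_induction_on with
  | _ n ih =>
    intro d s e
    match n, d with
    | 0, d => rw [pvARec_zero]
    | n + 1, 0 => simp [pvARec]
    | n + 1, d + 1 =>
      by_cases h : (e.1 - s.1 + 1) * (e.2.1 - s.2.1 + 1) * (e.2.2 - s.2.2 + 1) ≤ 32367
      · simp only [pvARec]; rw [if_pos h]; exact Nat.le_succ n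
      · rw [pvARec_big d n s e bn ss h]
        refine le_trans ?_ (Nat.le_succ n)
        -- fold over the sub-boxes, fuel only decreases
        generalize (pvSubs _ _ _ _ _ _ _ : List ((Int × Int × Int) × (Int × Int × Int))) = l
        have aux : ∀ (l : List ((Int × Int × Int) × (Int × Int × Int))) (st : Nat × List String),
            st.1 ≤ n → ((l.foldl (pvF d bn ss) st).1) ≤ st.1 := by
          intro l
          induction l with
          | nil => intro st _; exact le_refl _
          | cons b rest ihl =>
            intro st hst
            have h1 : (pvF d bn ss st b).1 ≤ st.1 := ih st.1 (Nat.lt_succ_of_le hst) d b.1 b.2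
            exact le_trans (ihl _ (le_trans h1 hst)) h1
        exact aux l (n, []) (le_refl n)



theorem pvFoldl_irr (bn ss : String) (d₁ d₂ N : Nat)
    (h : ∀ m, m ≤ N → ∀ (s e : Int × Int × Int), pvARec d₁ m s e bn ss = pvARec d₂ m s e bn ss) :
    ∀ (l : List ((Int × Int × Int) × (Int × Int × Int))) (st : Nat × List String),
      st.1 ≤ N → l.foldl (pvF d₁ bn ss) st = l.foldl (pvF d₂ bn ss) st := by
  intro l
  induction l with
  | nil => intro st _; rfl
  | cons b rest ih =>
    intro st hst
    have he : pvF d₁ bn ss st b = pvF d₂ bn ss st b := by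
      simp only [pvF]; rw [h st.1 hst b.1 b.2]
    have hle : (pvF d₂ bn ss st b).1 ≤ st.1 := pvARec_fst_le bn ss st.1 d₂ b.1 b.2
    simp only [List.foldl_cons]
    rw [he]
    exact ih _ (le_trans hle hst)

-- the depth argument is irrelevant as long as it dominates the threaded fuel
theorem pvARec_irr (bn ss : String) :
    ∀ n d₁ d₂ (s e : Int × Int × Int), n ≤ d₁ → n ≤ d₂ →
      pvARec d₁ n s e bn ss = pvARec d₂ n s e bn ss := by
  intro n
  induction n using Nat.strong_induction_on with
  | _ n ih =>
    intro d₁ d₂ s e h1 h2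
    match n, d₁, d₂ with
    | 0, d₁, d₂ => rw [pvARec_zero, pvARec_zero]
    | n + 1, d₁ + 1, d₂ + 1 =>
      by_cases hbc : (e.1 - s.1 + 1) * (e.2.1 - s.2.1 + 1) * (e.2.2 - s.2.2 + 1) ≤ 32367
      · simp only [pvARec, if_pos hbc]
      · rw [pvARec_big d₁ n s e bn ss hbc, pvARec_big d₂ n s e bn ss hbc]
        exact pvFoldl_irr bn ss d₁ d₂ n
          (fun m hm s' e' => ih m (Nat.lt_succ_of_le hm) d₁ d₂ s' e'
            (le_trans hm (Nat.le_of_succ_le_succ h1)) (le_trans hm (Nat.le_of_succ_le_succ h2)))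
          _ (n, []) (le_refl n)

-- the accumulator only ever grows on the right
theorem pvFoldl_acc (bn ss : String) (d : Nat) :
    ∀ (l : List ((Int × Int × Int) × (Int × Int × Int))) (st : Nat × List String),
      l.foldl (pvF d bn ss) st =
        ((l.foldl (pvF d bn ss) (st.1, [])).1, st.2 ++ (l.foldl (pvF d bn ss) (st.1, [])).2) := by
  intro l
  induction l with
  | nil => intro st; simp
  | cons b rest ih =>
    intro st
    simp only [List.foldl_cons]
    rw [ih (pvF d bn ss st b), ih (pvF d bn ss (st.1, []) b)]
    simp [pvF, List.append_assoc]


theorem pvFoldl_zero (bn ss : String) (d : Nat) :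
    ∀ (l : List ((Int × Int × Int) × (Int × Int × Int))) (st : Nat × List String),
      st.1 = 0 → l.foldl (pvF d bn ss) st = st := by
  intro l
  induction l with
  | nil => intro st _; rfl
  | cons b rest ih =>
    intro st h
    have hb : pvF d bn ss st b = st := by
      simp only [pvF, h, pvARec_zero]
      obtain ⟨f, acc⟩ := st
      simp_all
    simp only [List.foldl_cons, hb]
    exact ih st h


-- the two command builders produce the same string
theorem pvCmd_eq (x1 y1 z1 x2 y2 z2 : Int) (bn ss : String) :
    PySem.Str.join " "
      (if ss ≠ "" then
        ["fill", "~" ++ PySem.Int.toStr x1, "~" ++ PySem.Int.toStr y1, "~" ++ PySem.Int.toStr z1,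
         "~" ++ PySem.Int.toStr x2, "~" ++ PySem.Int.toStr y2, "~" ++ PySem.Int.toStr z2, bn] ++ [ss]
       else
        ["fill", "~" ++ PySem.Int.toStr x1, "~" ++ PySem.Int.toStr y1, "~" ++ PySem.Int.toStr z1,
         "~" ++ PySem.Int.toStr x2, "~" ++ PySem.Int.toStr y2, "~" ++ PySem.Int.toStr z2, bn]) =
      (if ss ≠ "" then
        ("fill ~" ++ PySem.Int.toStr x1 ++ " ~" ++ PySem.Int.toStr y1 ++ " ~" ++ PySem.Int.toStr z1 ++
         " ~" ++ PySem.Int.toStr x2 ++ " ~" ++ PySem.Int.toStr y2 ++ " ~" ++ PySem.Int.toStr z2 ++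
         " " ++ bn) ++ (" " ++ ss)
       else
        "fill ~" ++ PySem.Int.toStr x1 ++ " ~" ++ PySem.Int.toStr y1 ++ " ~" ++ PySem.Int.toStr z1 ++
         " ~" ++ PySem.Int.toStr x2 ++ " ~" ++ PySem.Int.toStr y2 ++ " ~" ++ PySem.Int.toStr z2 ++
         " " ++ bn) := by
  by_cases h : ss = ""
  · simp only [h, ne_eq, not_true_eq_false, if_false]
    apply String.toList_inj.mp
    simp [PySem.Str.join, PySem.Chars.join_cons_cons, PySem.Chars.join_singleton]
  · simp only [ne_eq, h, not_false_eq_true, if_true]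
    apply String.toList_inj.mp
    simp [PySem.Str.join, PySem.Chars.join_cons_cons, PySem.Chars.join_singleton]


-- the main alignment: B's loop with fuel n computes A's fold at any depth d ≥ n
set_option maxHeartbeats 1000000 in
theorem pvMain (bn ss : String) :
    ∀ n d (stack : List ((Int × Int × Int) × (Int × Int × Int))) (out : List String), n ≤ d →
      pvBLoop n stack out bn ss = out ++ (stack.foldl (pvF d bn ss) (n, [])).2 := by
  intro n
  induction n using Nat.strong_induction_on with
  | _ n ih =>
    intro d stack out hnd
    cases stack with
    | nil => cases n <;> simp [pvBLoop]
    | cons b rest =>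
      cases n with
      | zero =>
        rw [pvFoldl_zero bn ss d (b :: rest) (0, []) rfl]
        simp [pvBLoop]
      | succ n' =>
        obtain ⟨d', rfl⟩ : ∃ d', d = d' + 1 := ⟨d - 1, by omega⟩
        have hnd' : n' ≤ d' := Nat.le_of_succ_le_succ hnd
        by_cases hbc : (b.2.1 - b.1.1 + 1) * (b.2.2.1 - b.1.2.1 + 1) * (b.2.2.2 - b.1.2.2 + 1) ≤ 32367
        · -- small box: one command is emitted by both sides
          have hA : pvARec (d' + 1) (n' + 1) b.1 b.2 bn ss =
              (n', [if ss ≠ "" then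
                  "fill ~" ++ PySem.Int.toStr b.1.1 ++ " ~" ++ PySem.Int.toStr b.1.2.1 ++ " ~" ++
                    PySem.Int.toStr b.1.2.2 ++ " ~" ++ PySem.Int.toStr b.2.1 ++ " ~" ++
                    PySem.Int.toStr b.2.2.1 ++ " ~" ++ PySem.Int.toStr b.2.2.2 ++ " " ++ bn ++ (" " ++ ss)
                else
                  "fill ~" ++ PySem.Int.toStr b.1.1 ++ " ~" ++ PySem.Int.toStr b.1.2.1 ++ " ~" ++
                    PySem.Int.toStr b.1.2.2 ++ " ~" ++ PySem.Int.toStr b.2.1 ++ " ~" ++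
                    PySem.Int.toStr b.2.2.1 ++ " ~" ++ PySem.Int.toStr b.2.2.2 ++ " " ++ bn]) := by
            simp only [pvARec, if_pos hbc]
          simp only [pvBLoop, if_pos hbc]
          rw [ih n' (Nat.lt_succ_self n') (d' + 1) rest _ (Nat.le_succ_of_le hnd')]
          simp only [List.foldl_cons]
          have hF : pvF (d' + 1) bn ss (n' + 1, []) b = (n',
              [if ss ≠ "" then
                  "fill ~" ++ PySem.Int.toStr b.1.1 ++ " ~" ++ PySem.Int.toStr b.1.2.1 ++ " ~" ++
                    PySem.Int.toStr b.1.2.2 ++ " ~" ++ PySem.Int.toStr b.2.1 ++ " ~" ++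
                    PySem.Int.toStr b.2.2.1 ++ " ~" ++ PySem.Int.toStr b.2.2.2 ++ " " ++ bn ++ (" " ++ ss)
                else
                  "fill ~" ++ PySem.Int.toStr b.1.1 ++ " ~" ++ PySem.Int.toStr b.1.2.1 ++ " ~" ++
                    PySem.Int.toStr b.1.2.2 ++ " ~" ++ PySem.Int.toStr b.2.1 ++ " ~" ++
                    PySem.Int.toStr b.2.2.1 ++ " ~" ++ PySem.Int.toStr b.2.2.2 ++ " " ++ bn]) := by
            simp only [pvF, hA]; rfl
          rw [hF]
          conv_rhs => rw [pvFoldl_acc bn ss (d' + 1) rest]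
          rw [pvCmd_eq b.1.1 b.1.2.1 b.1.2.2 b.2.1 b.2.2.1 b.2.2.2 bn ss]
          simp [List.append_assoc]
        · -- oversized box: both sides continue with the sub-box grid
          simp only [pvBLoop, if_neg hbc]
          rw [ih n' (Nat.lt_succ_self n') (d' + 1) _ out (Nat.le_succ_of_le hnd')]
          rw [List.foldl_append, List.foldl_cons]
          have hirr := pvFoldl_irr bn ss d' (d' + 1) n'
            (fun m hm s' e' => pvARec_irr bn ss m d' (d' + 1) s' e' (le_trans hm hnd') (le_trans hm (Nat.le_succ_of_le hnd')))
            (pvSubs (max 1 (pvStep ((b.2.1 - b.1.1 + 1) * (b.2.2.1 - b.1.2.1 + 1) * (b.2.2.2 - b.1.2.2 + 1))))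
              b.1.1 b.1.2.1 b.1.2.2 b.2.1 b.2.2.1 b.2.2.2) (n', []) (le_refl n')
          have hF : pvF (d' + 1) bn ss (n' + 1, []) b =
              (pvSubs (max 1 (pvStep ((b.2.1 - b.1.1 + 1) * (b.2.2.1 - b.1.2.1 + 1) * (b.2.2.2 - b.1.2.2 + 1))))
                b.1.1 b.1.2.1 b.1.2.2 b.2.1 b.2.2.1 b.2.2.2).foldl (pvF (d' + 1) bn ss) (n', []) := by
            simp only [pvF, pvARec_big d' n' b.1 b.2 bn ss hbc, hirr]
            simp
          rw [hF]


-- ===== VERDICT =====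
theorem split_fill_command_spec : Claim_equal_split_fill_command := by
  intro start end_ bn ss _ _
  unfold Spec_split_fill_command split_fill_command split_fill_command_alt
  rw [pvMain bn ss 1000000000000000 1000000000000000 [(start, end_)] [] (le_refl _)]
  simp [List.foldl, pvF]
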